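-- pv_equiv track=rewrite | github.com/pytest-dev/pytest | py/_code/assertion.py | _format_explanation
-- ===== SOURCE A (Python) =====
-- def _format_explanation(explanation):
--     # uck!  See CallFunc for where \n{ and \n} escape sequences are used
--     raw_lines = (explanation or '').split('\n')
--     # escape newlines not followed by { and }
--     lines = [raw_lines[0]]
--     for l in raw_lines[1:]:
--         if l.startswith('{') or l.startswith('}'):
--             lines.append(l)
--         else:
--             lines[-1] += '\\n' + l
--
--     result = lines[:1]
--     stack = [0]
--     stackcnt = [0]
--     for line in lines[1:]:
--         if line.startswith('{'):
--             if stackcnt[-1]: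
--                 s = 'and   '
--             else:
--                 s = 'where '
--             stack.append(len(result))
--             stackcnt[-1] += 1
--             stackcnt.append(0)
--             result.append(' +' + '  '*(len(stack)-1) + s + line[1:])
--         else:
--             assert line.startswith('}')
--             stack.pop()
--             stackcnt.pop()
--             result[stack[-1]] += line[1:]
--     assert len(stack) == 1
--     return '\n'.join(result)
-- ===== SOURCE B (Python) =====
-- # B: recursive descent over the brace-nested line structure instead of an explicit stack machine.
-- def _rec(lines, i, depth, cnt):
--     # format the children of one block starting at position i; returns
--     # (formatted lines, suffix for the block's opening line, tail after the
--     #  closing '}' or None if input ran out, next position)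
--     if i == len(lines):
--         return [], '', None, i
--     line = lines[i]
--     if not line.startswith('{'):
--         return [], '', line[1:], i + 1
--     head = ' +' + '  ' * depth + ('where ' if cnt == 0 else 'and   ') + line[1:]
--     sub, csuf, ctail, j = _rec(lines, i + 1, depth + 1, 0)
--     if ctail is None:
--         return [head + csuf] + sub, '', None, j
--     out, suffix, tail, k = _rec(lines, j, depth, cnt + 1)
--     return [head + csuf] + sub + out, ctail + suffix, tail, k
--
--
-- def _format_explanation(explanation):
--     raw_lines = (explanation or '').split('\n')
--     lines = [raw_lines[0]]
--     for l in raw_lines[1:]: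
--         if l.startswith('{') or l.startswith('}'):
--             lines.append(l)
--         else:
--             lines[-1] += '\\n' + l
--     body, suffix, _tail, _j = _rec(lines, 1, 1, 0)
--     return '\n'.join([lines[0] + suffix] + body)
-- ===== Notes on version B (the rewrite author's own statement) =====
-- stated objective: alternative
-- what changed: The formatting pass's explicit stack machine (stack/stackcnt index lists and in-place edits of earlier result lines) is replaced by a recursive descent over the brace-nested line structure that returns each block's formatted lines, the suffix to splice onto the opening line, and the tail after the matching '}'; the forced line-merging pass is kept.
import Mathlib
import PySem

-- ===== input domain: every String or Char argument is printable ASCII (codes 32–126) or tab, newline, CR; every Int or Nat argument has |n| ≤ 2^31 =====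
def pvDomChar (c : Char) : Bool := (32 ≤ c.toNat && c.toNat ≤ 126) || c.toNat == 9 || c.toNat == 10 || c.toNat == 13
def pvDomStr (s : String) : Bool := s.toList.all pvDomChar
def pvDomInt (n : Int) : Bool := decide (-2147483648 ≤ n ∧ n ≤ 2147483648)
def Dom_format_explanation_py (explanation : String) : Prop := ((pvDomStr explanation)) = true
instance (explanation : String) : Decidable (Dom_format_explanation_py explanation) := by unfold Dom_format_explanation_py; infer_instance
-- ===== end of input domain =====

-- B replaces A's explicit stack machine (stack/stackcnt lists, in-place edits of earlier
-- result lines) by a recursive descent over the brace-nested line structure; same result,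
-- same cost (objective: alternative). Equivalence is about the return value; A mutates nothing.

-- ===== PORT A =====
-- shared first line-merging pass, identical in Source A and Source B:
-- raw_lines = explanation.split('\n'); lines = [raw_lines[0]]; merge non-{/} lines into the last one
def pvMergeStep (acc : List (List Char)) (l : List Char) : List (List Char) :=
  if PySem.Chars.startswith l ['{'] || PySem.Chars.startswith l ['}'] then acc ++ [l]
  else acc.dropLast ++ [acc.getLastD [] ++ '\\' :: 'n' :: l]   -- lines[-1] += '\\n' + l

def pvMergeLines (explanation : String) : List (List Char) :=
  -- (explanation or '') = explanation for a str argument; split on '\n' never returns none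
  let raw := (PySem.Chars.split? explanation.toList ['\n']).getD []
  raw.tail.foldl pvMergeStep [raw.headD []]

-- one iteration of A's loop over lines[1:], state = (result, stack, stackcnt)
def pvStepA (st : List (List Char) × List Nat × List Nat) (line : List Char) :
    List (List Char) × List Nat × List Nat :=
  match st with
  | (result, stack, stackcnt) =>
    if PySem.Chars.startswith line ['{'] then
      let s := if stackcnt.getLastD 0 ≠ 0 then "and   ".toList else "where ".toList
      let stack' := stack ++ [result.length]
      let stackcnt' := stackcnt.dropLast ++ [stackcnt.getLastD 0 + 1, 0]
      (result ++ [' ' :: '+' ::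
          ((List.replicate (stack'.length - 1) "  ".toList).flatten ++ s ++
            PySem.List.slice line (some 1) none)], stack', stackcnt')
    else
      -- Python asserts line.startswith('}') here; merged lines always satisfy it.
      -- stack.pop(); stackcnt.pop(); result[stack[-1]] += line[1:]
      -- (on a stray '}' Python raises IndexError — excluded by Pre_; getLastD is a dummy there)
      let stack' := stack.dropLast
      (result.modify (stack'.getLastD 0) (fun r => r ++ PySem.List.slice line (some 1) none),
       stack', stackcnt.dropLast)

def format_explanation_py (explanation : String) : String :=
  let lines := pvMergeLines explanation
  let fin := lines.tail.foldl pvStepA (lines.take 1, [0], [0])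
  -- final 'assert len(stack) == 1' raises only outside Pre_
  String.ofList (PySem.Chars.join ['\n'] fin.1)

-- ===== PORT B =====
-- B's recursive helper _rec(lines, i, depth, cnt): formats the children of one block;
-- returns (formatted lines, suffix for the opening line, tail after the matching '}'
-- (none = input exhausted), rest of the lines). Fuel bounds the recursion depth;
-- lines.length + 1 is always enough (each call consumes at least one line before recursing).
def pvRecB : Nat → Nat → Nat → List (List Char) →
    List (List Char) × List Char × Option (List Char) × List (List Char)
  | 0, _, _, lines => ([], [], none, lines)
  | _ + 1, _, _, [] => ([], [], none, [])
  | fuel + 1, d, cnt, line :: rest =>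
    if PySem.Chars.startswith line ['{'] then
      -- head = ' +' + '  '*depth + ('where ' if cnt == 0 else 'and   ') + line[1:]
      let head := ' ' :: '+' ::
          ((List.replicate d "  ".toList).flatten ++
            (if cnt = 0 then "where ".toList else "and   ".toList) ++
            PySem.List.slice line (some 1) none)
      match pvRecB fuel (d + 1) 0 rest with
      | (sub, csuf, ctail, rest1) =>
        match ctail with
        | none => ((head ++ csuf) :: sub, [], none, rest1)
        | some ct =>
          match pvRecB fuel d (cnt + 1) rest1 with
          | (out2, suf2, tail2, rest2) => ((head ++ csuf) :: (sub ++ out2), ct ++ suf2, tail2, rest2)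
    else ([], [], some (PySem.List.slice line (some 1) none), rest)

def format_explanation_py_alt (explanation : String) : String :=
  let lines := pvMergeLines explanation
  match pvRecB (lines.length + 1) 1 0 lines.tail with
  | (body, suffix, _tail, _rest) =>
    String.ofList (PySem.Chars.join ['\n'] ((lines.headD [] ++ suffix) :: body))

-- ===== PRECONDITION & SPEC =====
def pvMarker (l : List Char) : Option Int :=
  if PySem.Chars.startswith l ['{'] then some 1
  else if PySem.Chars.startswith l ['}'] then some (-1) else none

-- Pre_ excludes exactly the inputs on which A raises: explanations whose newline-separated
-- lines carry an unbalanced '{'/'}' marker structure (AssertionError on an unclosed '{',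
-- IndexError on a stray '}').
def Pre_format_explanation_py (explanation : String) : Prop :=
  let ps := ((PySem.Chars.split? explanation.toList ['\n']).getD []).tail.filterMap pvMarker
  (∀ n ∈ List.range (ps.length + 1), 0 ≤ (ps.take n).sum) ∧ ps.sum = 0

instance (explanation : String) : Decidable (Pre_format_explanation_py explanation) := by
  unfold Pre_format_explanation_py; infer_instance

def pvWitness_format_explanation_py : String := "assert x\n{x = 1\n{y = 2\n}\n} tail"

def Spec_format_explanation_py (explanation : String) (out : String) : Prop := out = format_explanation_py_alt explanation
instance (explanation : String) (out : String) : Decidable (Spec_format_explanation_py explanation out) := by unfold Spec_format_explanation_py; infer_instance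

-- ===== CLAIM (what is proved, stated in full; the proofs are below) =====
def Claim_equal_format_explanation_py : Prop := ∀ (explanation : String), Dom_format_explanation_py explanation → Pre_format_explanation_py explanation → Spec_format_explanation_py explanation (format_explanation_py explanation)


-- ===== LEMMAS AND PROOFS =====

-- the value of a merged line in the brace balance (+1 for '{…', −1 otherwise)
def pvV (l : List Char) : Int := if PySem.Chars.startswith l ['{'] then 1 else -1

theorem pvSwNil (b : Char) : PySem.Chars.startswith [] [b] = false := by
  simp [PySem.Chars.startswith, List.isPrefixOf]

theorem pvSwCons (c b : Char) (l : List Char) :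
    PySem.Chars.startswith (c :: l) [b] = (c == b) := by
  by_cases h : c = b <;> simp [PySem.Chars.startswith, List.isPrefixOf, h] <;>
    simp [beq_iff_eq, h, Ne.symm h]

theorem pvV_append (a l : List Char) : pvV (a ++ '\\' :: 'n' :: l) = pvV a := by
  cases a with
  | nil => simp [pvV, pvSwNil, pvSwCons]
  | cons c cs => simp [pvV, pvSwCons]

theorem pvMergeAcc_ne_nil (ls : List (List Char)) :
    ∀ acc : List (List Char), acc ≠ [] → ls.foldl pvMergeStep acc ≠ [] := by
  induction ls with
  | nil => intro acc h; simpa using h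
  | cons l ls ih =>
      intro acc h
      rw [List.foldl_cons]
      apply ih
      unfold pvMergeStep
      split <;> simp

-- modify kit
theorem pvModifyAppendL {α : Type} (l r : List α) (i : Nat) (f : α → α) (h : i < l.length) :
    (l ++ r).modify i f = l.modify i f ++ r := by
  apply List.ext_getElem
  · simp
  · intro j h1 h2
    simp only [List.getElem_modify, List.getElem_append, List.length_modify]
    split_ifs <;> simp_all [List.getElem_modify] <;> omega

theorem pvModifyAt {α : Type} (l : List α) (x : α) (r : List α) (f : α → α) :
    (l ++ x :: r).modify l.length f = l ++ f x :: r := by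
  apply List.ext_getElem
  · simp
  · intro j h1 h2
    simp only [List.getElem_modify, List.getElem_append, List.getElem_cons]
    split_ifs <;> simp_all <;> omega

theorem pvModifyModify {α : Type} (l : List α) (i : Nat) (f g : α → α) :
    (l.modify i f).modify i g = l.modify i (fun x => g (f x)) := by
  apply List.ext_getElem
  · simp
  · intro j h1 h2
    simp only [List.getElem_modify]
    split_ifs <;> rfl

theorem pvModifyNilApp (l : List (List Char)) (i : Nat) :
    l.modify i (fun r => r ++ ([] : List Char)) = l := by
  have : (fun r : List Char => r ++ ([] : List Char)) = id := by funext r; simp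
  rw [this, List.modify_id]

-- rest of pvRecB is a suffix: its length never grows
theorem pvRecB_len : ∀ (fuel d cnt : Nat) (lines : List (List Char)),
    (pvRecB fuel d cnt lines).2.2.2.length ≤ lines.length := by
  intro fuel
  induction fuel with
  | zero => intro d cnt lines; simp [pvRecB]
  | succ fuel ih =>
      intro d cnt lines
      cases lines with
      | nil => simp [pvRecB]
      | cons line rest =>
          by_cases hl : PySem.Chars.startswith line ['{']
          · rcases h1 : pvRecB fuel (d + 1) 0 rest with ⟨sub, csuf, ctail, rest1⟩
            cases ctail with
            | none =>
                have := ih (d + 1) 0 rest; rw [h1] at this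
                simp [pvRecB, hl, h1]; simp at this; omega
            | some ct =>
                rcases h2 : pvRecB fuel d (cnt + 1) rest1 with ⟨out2, suf2, tail2, rest2⟩
                have ha := ih (d + 1) 0 rest; rw [h1] at ha
                have hb := ih d (cnt + 1) rest1; rw [h2] at hb
                simp [pvRecB, hl, h1, h2]; simp at ha hb; omega
          · simp [pvRecB, hl]

-- structure of a run: the rest is lines.drop m, and when a tail is returned the
-- consumed prefix has brace sum −1
theorem pvRecB_struct : ∀ (fuel : Nat) (lines : List (List Char)) (d cnt : Nat),
    lines.length + 1 ≤ fuel →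
    ∃ m, m ≤ lines.length ∧ (pvRecB fuel d cnt lines).2.2.2 = lines.drop m ∧
      (∀ t, (pvRecB fuel d cnt lines).2.2.1 = some t → ((lines.take m).map pvV).sum = -1) := by
  intro fuel
  induction fuel with
  | zero => intro lines d cnt h; omega
  | succ fuel ih =>
      intro lines d cnt hlen
      cases lines with
      | nil => exact ⟨0, by simp [pvRecB]⟩
      | cons line rest =>
          simp only [List.length_cons] at hlen
          by_cases hl : PySem.Chars.startswith line ['{']
          · rcases h1 : pvRecB fuel (d + 1) 0 rest with ⟨sub, csuf, ctail, rest1⟩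
            obtain ⟨m1, hm1le, hm1rest, hm1sum⟩ := ih rest (d + 1) 0 (by omega)
            rw [h1] at hm1rest hm1sum
            dsimp only at hm1rest hm1sum
            cases ctail with
            | none =>
                refine ⟨m1 + 1, by simp; omega, ?_, ?_⟩
                · simp [pvRecB, hl, h1, hm1rest]
                · intro t ht; simp [pvRecB, hl, h1] at ht
            | some ct =>
                rcases h2 : pvRecB fuel d (cnt + 1) rest1 with ⟨out2, suf2, tail2, rest2⟩
                have hr1len : rest1.length ≤ rest.length := by
                  rw [hm1rest]; simp
                obtain ⟨m2, hm2le, hm2rest, hm2sum⟩ := ih rest1 d (cnt + 1) (by omega)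
                rw [h2] at hm2rest hm2sum
                dsimp only at hm2rest hm2sum
                have hr1eq : rest1.length = rest.length - m1 := by rw [hm1rest]; simp
                refine ⟨1 + m1 + m2, by simp; omega, ?_, ?_⟩
                · simp only [pvRecB, hl, if_pos, h1, h2]
                  have : (1 + m1 + m2) = (m1 + m2) + 1 := by omega
                  rw [this, List.drop_succ_cons, ← List.drop_drop, ← hm1rest, hm2rest]
                · intro t ht
                  simp only [pvRecB, hl, if_pos, h1, h2] at ht
                  have hs1 : ((rest.take m1).map pvV).sum = -1 := hm1sum ct rfl
                  have hs2 : ((rest1.take m2).map pvV).sum = -1 := hm2sum t ht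
                  have h3 : (1 + m1 + m2) = (m1 + m2) + 1 := by omega
                  rw [h3, List.take_succ_cons, List.map_cons, List.sum_cons, List.take_add,
                    ← hm1rest, List.map_append, List.sum_append, hs1, hs2]
                  simp [pvV, hl]
          · refine ⟨1, by simp, by simp [pvRecB, hl], ?_⟩
            intro t ht
            simp [pvV, hl]

-- the simulation: A's stack machine from a state (result R, stack σ++[p], stackcnt κ++[c])
-- computes what B's recursion at depth σ.length+1 describes
theorem pvSim : ∀ (fuel : Nat) (lines : List (List Char)), lines.length + 1 ≤ fuel →
    ∀ (R : List (List Char)) (σ : List Nat) (p c : Nat) (κ : List Nat),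
    (∀ q ∈ σ ++ [p], q < R.length) →
    ((pvRecB fuel (σ.length + 1) c lines).2.2.1 = none →
      ∃ s' k', lines.foldl pvStepA (R, σ ++ [p], κ ++ [c]) =
        ((R ++ (pvRecB fuel (σ.length + 1) c lines).1).modify p
          (· ++ (pvRecB fuel (σ.length + 1) c lines).2.1), s', k')) ∧
    (∀ t, (pvRecB fuel (σ.length + 1) c lines).2.2.1 = some t →
      lines.foldl pvStepA (R, σ ++ [p], κ ++ [c]) =
        (pvRecB fuel (σ.length + 1) c lines).2.2.2.foldl pvStepA
          ((((R ++ (pvRecB fuel (σ.length + 1) c lines).1).modify p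
              (· ++ (pvRecB fuel (σ.length + 1) c lines).2.1)).modify (σ.getLastD 0) (· ++ t)),
            σ, κ)) := by
  intro fuel
  induction fuel with
  | zero => intro lines hlen; omega
  | succ fuel ih =>
      intro lines hlen R σ p c κ hinv
      have hp : p < R.length := hinv p (by simp)
      cases lines with
      | nil =>
          have hnil : pvRecB (fuel + 1) (σ.length + 1) c [] = ([], [], none, []) := by
            simp [pvRecB]
          rw [hnil]
          dsimp only
          constructor
          · intro _
            refine ⟨σ ++ [p], κ ++ [c], ?_⟩
            rw [List.foldl_nil, List.append_nil, pvModifyNilApp]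
          · intro t ht
            exact absurd ht (by simp)
      | cons line rest =>
          simp only [List.length_cons] at hlen
          by_cases hl : PySem.Chars.startswith line ['{']
          · have hstep : pvStepA (R, σ ++ [p], κ ++ [c]) line
                = (R ++ [(' ' :: '+' :: ((List.replicate (σ.length + 1) "  ".toList).flatten ++ (if c = 0 then "where ".toList else "and   ".toList) ++ PySem.List.slice line (some 1) none))], (σ ++ [p]) ++ [R.length], (κ ++ [c + 1]) ++ [0]) := by
              by_cases hc : c = 0 <;>
                simp [pvStepA, hl, hc, List.getLastD_concat, List.dropLast_concat]
            have hr : rest.length + 1 ≤ fuel := by omega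
            rcases h1 : pvRecB fuel (σ.length + 1 + 1) 0 rest with ⟨sub, csuf, ctail, rest1⟩
            have hinv' : ∀ q ∈ (σ ++ [p]) ++ [R.length], q < (R ++ [(' ' :: '+' :: ((List.replicate (σ.length + 1) "  ".toList).flatten ++ (if c = 0 then "where ".toList else "and   ".toList) ++ PySem.List.slice line (some 1) none))]).length := by
              intro q hq
              simp only [List.length_append, List.length_cons, List.length_nil]
              simp only [List.mem_append, List.mem_cons, List.not_mem_nil, or_false] at hq
              rcases hq with (hq | hq) | hq
              · exact lt_of_lt_of_le (hinv q (by simp [hq])) (by omega)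
              · exact lt_of_lt_of_le (hinv q (by simp [hq])) (by omega)
              · omega
            have hch := ih rest hr (R ++ [(' ' :: '+' :: ((List.replicate (σ.length + 1) "  ".toList).flatten ++ (if c = 0 then "where ".toList else "and   ".toList) ++ PySem.List.slice line (some 1) none))]) (σ ++ [p]) R.length 0 (κ ++ [c + 1]) hinv'
            rw [show (σ ++ [p]).length = σ.length + 1 by simp] at hch
            rw [h1] at hch
            dsimp only at hch
            cases ctail with
            | none =>
                have hrec : pvRecB (fuel + 1) (σ.length + 1) c (line :: rest)
                    = (((' ' :: '+' :: ((List.replicate (σ.length + 1) "  ".toList).flatten ++ (if c = 0 then "where ".toList else "and   ".toList) ++ PySem.List.slice line (some 1) none)) ++ csuf) :: sub, [], none, rest1) := by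
                  simp [pvRecB, hl, h1]
                rw [hrec]
                dsimp only
                constructor
                · intro _
                  obtain ⟨s', k', heq⟩ := hch.1 rfl
                  refine ⟨s', k', ?_⟩
                  rw [List.foldl_cons, hstep, heq, pvModifyNilApp]
                  rw [show (R ++ [(' ' :: '+' :: ((List.replicate (σ.length + 1) "  ".toList).flatten ++ (if c = 0 then "where ".toList else "and   ".toList) ++ PySem.List.slice line (some 1) none))]) ++ sub = R ++ (' ' :: '+' :: ((List.replicate (σ.length + 1) "  ".toList).flatten ++ (if c = 0 then "where ".toList else "and   ".toList) ++ PySem.List.slice line (some 1) none)) :: sub by simp]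
                  rw [pvModifyAt]
                · intro t ht; exact absurd ht (by simp)
            | some ct =>
                rcases h2 : pvRecB fuel (σ.length + 1) (c + 1) rest1 with ⟨out2, suf2, tail2, rest2⟩
                have hr2 : rest1.length + 1 ≤ fuel := by
                  have := pvRecB_len fuel (σ.length + 1 + 1) 0 rest
                  rw [h1] at this; dsimp only at this; omega
                have hchs := hch.2 ct rfl
                rw [List.getLastD_concat] at hchs
                have hR2 : ((R ++ [(' ' :: '+' :: ((List.replicate (σ.length + 1) "  ".toList).flatten ++ (if c = 0 then "where ".toList else "and   ".toList) ++ PySem.List.slice line (some 1) none))]) ++ sub).modify R.length (· ++ csuf)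
                    = R ++ ((' ' :: '+' :: ((List.replicate (σ.length + 1) "  ".toList).flatten ++ (if c = 0 then "where ".toList else "and   ".toList) ++ PySem.List.slice line (some 1) none)) ++ csuf) :: sub := by
                  rw [show (R ++ [(' ' :: '+' :: ((List.replicate (σ.length + 1) "  ".toList).flatten ++ (if c = 0 then "where ".toList else "and   ".toList) ++ PySem.List.slice line (some 1) none))]) ++ sub = R ++ (' ' :: '+' :: ((List.replicate (σ.length + 1) "  ".toList).flatten ++ (if c = 0 then "where ".toList else "and   ".toList) ++ PySem.List.slice line (some 1) none)) :: sub by simp]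
                  rw [pvModifyAt]
                rw [hR2] at hchs
                have hct := ih rest1 hr2 ((R ++ ((' ' :: '+' :: ((List.replicate (σ.length + 1) "  ".toList).flatten ++ (if c = 0 then "where ".toList else "and   ".toList) ++ PySem.List.slice line (some 1) none)) ++ csuf) :: sub).modify p (· ++ ct)) σ p (c + 1) κ
                  (by intro q hq
                      have := hinv q hq
                      simp only [List.length_modify, List.length_append, List.length_cons]
                      omega)
                rw [h2] at hct
                dsimp only at hct
                have hcomp : ∀ (zs : List (List Char)) (w : List Char),
                    (((R ++ ((' ' :: '+' :: ((List.replicate (σ.length + 1) "  ".toList).flatten ++ (if c = 0 then "where ".toList else "and   ".toList) ++ PySem.List.slice line (some 1) none)) ++ csuf) :: sub).modify p (· ++ ct)) ++ zs).modify p (· ++ w)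
                    = ((R ++ ((' ' :: '+' :: ((List.replicate (σ.length + 1) "  ".toList).flatten ++ (if c = 0 then "where ".toList else "and   ".toList) ++ PySem.List.slice line (some 1) none)) ++ csuf) :: (sub ++ zs)).modify p (· ++ (ct ++ w))) := by
                  intro zs w
                  rw [← (pvModifyAppendL _ _ _ _ (by simp only [List.length_append, List.length_cons]; omega))]
                  rw [pvModifyModify]
                  rw [show (R ++ ((' ' :: '+' :: ((List.replicate (σ.length + 1) "  ".toList).flatten ++ (if c = 0 then "where ".toList else "and   ".toList) ++ PySem.List.slice line (some 1) none)) ++ csuf) :: sub) ++ zs = R ++ ((' ' :: '+' :: ((List.replicate (σ.length + 1) "  ".toList).flatten ++ (if c = 0 then "where ".toList else "and   ".toList) ++ PySem.List.slice line (some 1) none)) ++ csuf) :: (sub ++ zs) by simp]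
                  congr 1
                  funext x
                  simp
                cases tail2 with
                | none =>
                    have hrec : pvRecB (fuel + 1) (σ.length + 1) c (line :: rest)
                        = (((' ' :: '+' :: ((List.replicate (σ.length + 1) "  ".toList).flatten ++ (if c = 0 then "where ".toList else "and   ".toList) ++ PySem.List.slice line (some 1) none)) ++ csuf) :: (sub ++ out2), ct ++ suf2, none, rest2) := by
                      simp [pvRecB, hl, h1, h2]
                    rw [hrec]
                    dsimp only
                    constructor
                    · intro _
                      obtain ⟨s', k', heq2⟩ := hct.1 rfl
                      refine ⟨s', k', ?_⟩
                      rw [List.foldl_cons, hstep, hchs, heq2, hcomp out2 suf2]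
                    · intro t ht; exact absurd ht (by simp)
                | some t =>
                    have hrec : pvRecB (fuel + 1) (σ.length + 1) c (line :: rest)
                        = (((' ' :: '+' :: ((List.replicate (σ.length + 1) "  ".toList).flatten ++ (if c = 0 then "where ".toList else "and   ".toList) ++ PySem.List.slice line (some 1) none)) ++ csuf) :: (sub ++ out2), ct ++ suf2, some t, rest2) := by
                      simp [pvRecB, hl, h1, h2]
                    rw [hrec]
                    dsimp only
                    constructor
                    · intro h; exact absurd h (by simp)
                    · intro t' ht'
                      have ht'' : t' = t := by simpa using ht'.symm
                      subst ht''
                      rw [List.foldl_cons, hstep, hchs, hct.2 t' rfl, hcomp out2 suf2]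
          · have hrec : pvRecB (fuel + 1) (σ.length + 1) c (line :: rest)
                = ([], [], some (PySem.List.slice line (some 1) none), rest) := by
              simp [pvRecB, hl]
            rw [hrec]
            dsimp only
            constructor
            · intro h; exact absurd h (by simp)
            · intro t ht
              have ht2 : t = PySem.List.slice line (some 1) none := by simpa using ht.symm
              subst ht2
              have hstep : pvStepA (R, σ ++ [p], κ ++ [c]) line
                  = (R.modify (σ.getLastD 0) (· ++ PySem.List.slice line (some 1) none), σ, κ) := by
                simp [pvStepA, hl, List.dropLast_concat]
              rw [List.foldl_cons, hstep, List.append_nil, pvModifyNilApp]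

-- the merge pass preserves the brace-marker sequence
theorem pvBridge : ∀ (ls : List (List Char)) (acc : List (List Char)), acc ≠ [] →
    (ls.foldl pvMergeStep acc).tail.map pvV = acc.tail.map pvV ++ ls.filterMap pvMarker := by
  intro ls
  induction ls with
  | nil => intro acc _; simp
  | cons l ls ih =>
      intro acc hacc
      have hne : pvMergeStep acc l ≠ [] := by unfold pvMergeStep; split <;> simp
      rw [List.foldl_cons, ih _ hne]
      have hTC : ∀ (xs : List (List Char)) (x : List Char), xs ≠ [] →
          (xs ++ [x]).tail = xs.tail ++ [x] := by
        intro xs x h; cases xs with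
        | nil => simp at h
        | cons a t => simp
      by_cases h1 : PySem.Chars.startswith l ['{']
      · simp [pvMergeStep, pvMarker, h1, hTC acc l hacc, pvV]
      · by_cases h2 : PySem.Chars.startswith l ['}']
        · simp [pvMergeStep, pvMarker, h1, h2, hTC acc l hacc, pvV]
        · have hm : pvMarker l = none := by simp [pvMarker, h1, h2]
          rw [List.filterMap_cons, hm]
          congr 1
          simp only [pvMergeStep]
          rw [if_neg (by simp [h1, h2])]
          cases acc with
          | nil => simp at hacc
          | cons a t =>
              cases t with
              | nil => simp
              | cons b t' =>
                  have hbt : (b :: t') ≠ ([] : List (List Char)) := by simp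
                  rw [List.dropLast_cons₂, List.getLastD_cons,
                    List.getLastD_eq_getLast?, List.getLast?_eq_getLast hbt, Option.getD_some,
                    List.cons_append, List.tail_cons, List.tail_cons]
                  conv_rhs => rw [← List.dropLast_append_getLast (l := b :: t') hbt]
                  rw [List.map_append, List.map_append]
                  congr 1
                  simp [pvV_append]


-- ===== VERDICT (by name: the statement is the Claim_ definition above) =====
theorem pvMergeLines_ne_nil (e : String) : pvMergeLines e ≠ [] := by
  unfold pvMergeLines
  exact pvMergeAcc_ne_nil _ _ (by simp)

theorem format_explanation_py_spec : Claim_equal_format_explanation_py := by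
  unfold Claim_equal_format_explanation_py
  intro e _ hpre
  unfold Spec_format_explanation_py format_explanation_py format_explanation_py_alt
  obtain ⟨h, t, hL⟩ := List.exists_cons_of_ne_nil (pvMergeLines_ne_nil e)
  have hbr : t.map pvV = ((PySem.Chars.split? e.toList ['\n']).getD []).tail.filterMap pvMarker := by
    have hb := pvBridge ((PySem.Chars.split? e.toList ['\n']).getD []).tail
      [((PySem.Chars.split? e.toList ['\n']).getD []).headD []] (by simp)
    rw [show ((PySem.Chars.split? e.toList ['\n']).getD []).tail.foldl pvMergeStep
        [((PySem.Chars.split? e.toList ['\n']).getD []).headD []] = pvMergeLines e from rfl, hL] at hb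
    simpa using hb
  simp only [hL, List.length_cons, List.tail_cons, List.headD_cons, List.take_succ_cons,
    List.take_zero]
  rcases hrec : pvRecB (t.length + 1 + 1) 1 0 t with ⟨out, suf, tail, rest⟩
  have htail : tail = none := by
    cases tail with
    | none => rfl
    | some t' =>
        obtain ⟨m, hm, _, hsum⟩ := pvRecB_struct (t.length + 1 + 1) t 1 0 (by omega)
        rw [hrec] at hsum
        dsimp only at hsum
        have h1 : ((t.take m).map pvV).sum = -1 := hsum t' rfl
        unfold Pre_format_explanation_py at hpre
        have hlen : (((PySem.Chars.split? e.toList ['\n']).getD []).tail.filterMap pvMarker).length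
            = t.length := by rw [← hbr]; simp
        have h2 := hpre.1 m (by rw [List.mem_range, hlen]; omega)
        rw [← hbr, ← List.map_take] at h2
        omega
  subst htail
  have hsim := pvSim (t.length + 1 + 1) t (by omega) [h] [] 0 0 []
    (by intro q hq; simp at hq; simp [hq])
  simp only [List.length_nil, List.nil_append, Nat.zero_add] at hsim
  rw [hrec] at hsim
  dsimp only at hsim
  obtain ⟨s', k', heq⟩ := hsim.1 rfl
  rw [heq]
  have hmod : ([h] ++ out).modify 0 (· ++ suf) = (h ++ suf) :: out := by
    have hx := pvModifyAt ([] : List (List Char)) h out (· ++ suf)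
    simpa using hx
  rw [hmod]
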